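-- pv_equiv track=rewrite | github.com/rewhy/said | Attack Car/Real car/Attack_Tool/utils.py | findLowestID
-- ===== SOURCE A (Python) =====
-- def findLowestID(MsgList):
--     Dict = {}
--     lowest_id = 999999
--     for msg in MsgList:
--         str_id = msg[3]
--         int_id = int(str_id, 16)
--         if int_id in Dict:
--             Dict[int_id].append(msg)
--         else:
--             Dict[int_id] = [msg]
--             if int_id < lowest_id:
--                 lowest_id = int_id
--     if lowest_id < 999999:
--         IDList = Dict[lowest_id]
--         return IDList
--     else:
--         return None
-- ===== SOURCE B (Python) =====
-- def findLowestID(MsgList):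
--     ids = [int(msg[3], 16) for msg in MsgList]
--     if not ids:
--         return None
--     m = min(ids)
--     return [msg for msg, i in zip(MsgList, ids) if i == m]
-- ===== Notes on version B (the rewrite author's own statement) =====
-- stated objective: simpler
-- what changed: Replaces A's dict-grouping pass (hash map of id -> messages plus a running-lowest sentinel) by a min-reduction over the parsed hex ids followed by an order-preserving filter, with no dictionary at all.
-- intended difference: On nonempty lists whose parsed hex ids are all >= 999999 A returns None (its 999999 initialisation sentinel is never beaten), while B returns the messages carrying the true lowest id, which is what a function named findLowestID is meant to return. — e.g. on findLowestID([["x", "y", "z", "f423f"]]): A returns none, B returns some [["x", "y", "z", "f423f"]]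
import Mathlib
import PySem

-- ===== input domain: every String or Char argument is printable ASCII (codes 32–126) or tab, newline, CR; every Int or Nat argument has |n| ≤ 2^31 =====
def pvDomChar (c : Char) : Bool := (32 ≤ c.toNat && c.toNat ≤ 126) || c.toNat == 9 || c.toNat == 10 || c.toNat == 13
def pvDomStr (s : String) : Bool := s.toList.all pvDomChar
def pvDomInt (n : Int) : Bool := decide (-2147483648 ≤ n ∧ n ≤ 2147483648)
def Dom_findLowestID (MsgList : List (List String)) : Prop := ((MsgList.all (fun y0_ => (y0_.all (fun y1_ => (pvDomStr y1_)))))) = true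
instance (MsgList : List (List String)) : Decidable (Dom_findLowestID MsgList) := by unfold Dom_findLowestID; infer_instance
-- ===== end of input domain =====

-- B drops A's dict-grouping pass in favour of a min-reduction over the parsed hex ids followed by
-- an order-preserving filter (same cost, simpler); B intentionally fixes A's 999999-sentinel corner (see D_).

-- shared step `int(msg[3], 16)` (0 is a dummy for inputs outside Pre_, where Python raises)
def pvHexId (msg : List String) : Int :=
  (((PySem.List.pyGet? msg 3).bind (fun s => PySem.Int.ofStrBase? s 16)).getD 0)

-- ===== PORT A =====
def findLowestID (MsgList : List (List String)) : Option (List (List String)) :=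
  let st := MsgList.foldl
    (fun (st : PySem.Dict Int (List (List String)) × Int) msg =>
      let int_id := pvHexId msg
      if st.1.contains int_id then
        (st.1.modify int_id [] (fun l => l ++ [msg]), st.2)
      else
        (st.1.insert int_id [msg], if int_id < st.2 then int_id else st.2))
    (PySem.Dict.empty, (999999 : Int))
  if st.2 < 999999 then some (st.1.getD st.2 []) else none

-- ===== PORT B =====
def findLowestID_alt (MsgList : List (List String)) : Option (List (List String)) :=
  let ids := MsgList.map pvHexId
  match PySem.List.min? ids (fun x => x) with
  | none => none
  | some m => some (((MsgList.zip ids).filter (fun p => p.2 == m)).map (·.1))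

-- ===== PRECONDITION & SPEC =====
-- Pre_ excludes exactly the inputs on which Python A raises: a message without index 3
-- (IndexError) or whose fourth field is not a valid base-16 int literal (ValueError).
def Pre_findLowestID (MsgList : List (List String)) : Prop :=
  (MsgList.all (fun msg => ((PySem.List.pyGet? msg 3).bind (fun s => PySem.Int.ofStrBase? s 16)).isSome)) = true
instance (MsgList : List (List String)) : Decidable (Pre_findLowestID MsgList) := by unfold Pre_findLowestID; infer_instance
def pvWitness_findLowestID : List (List String) := [["a", "b", "c", "1A"], ["d", "e", "f", "2"]]

-- On nonempty lists whose parsed hex ids are all >= 999999 A returns None (its 999999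
-- initialisation sentinel is never beaten), while B returns the messages carrying the true
-- lowest id, which is what a function named findLowestID is meant to return.
def D_findLowestID (MsgList : List (List String)) : Prop :=
  MsgList ≠ [] ∧ (MsgList.all (fun msg => decide (999999 ≤ pvHexId msg))) = true
instance (MsgList : List (List String)) : Decidable (D_findLowestID MsgList) := by unfold D_findLowestID; infer_instance

def Spec_findLowestID (MsgList : List (List String)) (out : Option (List (List String))) : Prop :=
  ¬ D_findLowestID MsgList → out = findLowestID_alt MsgList
instance (MsgList : List (List String)) (out : Option (List (List String))) : Decidable (Spec_findLowestID MsgList out) := by unfold Spec_findLowestID; infer_instance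

def pvDiffWitness_findLowestID : List (List String) := [["x", "y", "z", "f423f"]]
def pvDiffWitnessOut_findLowestID : (Option (List (List String))) × (Option (List (List String))) :=
  (none, some [["x", "y", "z", "f423f"]])

-- ===== CLAIM (what is proved, stated in full; the proofs are below) =====
def Claim_unchanged_findLowestID : Prop := ∀ (MsgList : List (List String)), Dom_findLowestID MsgList → Pre_findLowestID MsgList → Spec_findLowestID MsgList (findLowestID MsgList)
def Claim_changed_findLowestID : Prop := Dom_findLowestID (pvDiffWitness_findLowestID) ∧ Pre_findLowestID (pvDiffWitness_findLowestID) ∧ D_findLowestID (pvDiffWitness_findLowestID) ∧ findLowestID (pvDiffWitness_findLowestID) = pvDiffWitnessOut_findLowestID.1 ∧ findLowestID_alt (pvDiffWitness_findLowestID) = pvDiffWitnessOut_findLowestID.2 ∧ pvDiffWitnessOut_findLowestID.1 ≠ pvDiffWitnessOut_findLowestID.2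
def Claim_exact_findLowestID : Prop := ∀ (MsgList : List (List String)), Dom_findLowestID MsgList → Pre_findLowestID MsgList → D_findLowestID MsgList → findLowestID MsgList ≠ findLowestID_alt MsgList

-- ===== LEMMAS AND PROOFS =====

theorem pv_foldl_min_le_init (l : List Int) (a : Int) : l.foldl min a ≤ a := by
  induction l generalizing a with
  | nil => simp
  | cons x t ih => exact le_trans (ih (min a x)) (min_le_left a x)

theorem pv_foldl_min_le_mem (l : List Int) (a i : Int) (h : i ∈ l) : l.foldl min a ≤ i := by
  induction l generalizing a with
  | nil => cases h
  | cons x t ih =>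
    rcases List.mem_cons.mp h with rfl | h'
    · exact le_trans (pv_foldl_min_le_init t (min a i)) (min_le_right a i)
    · exact ih (min a x) h'

theorem pv_foldl_min_eq_of_le (l : List Int) (a : Int) (h : ∀ i ∈ l, a ≤ i) :
    l.foldl min a = a := by
  induction l generalizing a with
  | nil => rfl
  | cons x t ih =>
    have hx : min a x = a := min_eq_left (h x (List.mem_cons_self))
    simp only [List.foldl_cons, hx]
    exact ih a (fun i hi => h i (List.mem_cons_of_mem _ hi))

theorem pv_foldl_min_init (t : List Int) (a b : Int) :
    t.foldl min (min a b) = min a (t.foldl min b) := by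
  induction t generalizing b with
  | nil => rfl
  | cons c t ih => simp only [List.foldl_cons, min_assoc, ih]

theorem pv_zip_filter (xs : List (List String)) (m : Int) :
    (((xs.zip (xs.map pvHexId)).filter (fun p => p.2 == m)).map (·.1))
      = xs.filter (fun x => pvHexId x == m) := by
  induction xs with
  | nil => rfl
  | cons x t ih =>
    simp only [List.map_cons, List.zip_cons_cons, List.filter_cons]
    by_cases h : (pvHexId x == m) = true
    · simp [h, ih]
    · simp [h, ih]

-- characterisation of A's loop state
theorem pv_loopA (xs : List (List String)) :
    (xs.foldl
      (fun (st : PySem.Dict Int (List (List String)) × Int) msg =>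
        let int_id := pvHexId msg
        if st.1.contains int_id then
          (st.1.modify int_id [] (fun l => l ++ [msg]), st.2)
        else
          (st.1.insert int_id [msg], if int_id < st.2 then int_id else st.2))
      (PySem.Dict.empty, (999999 : Int))).2 = (xs.map pvHexId).foldl min 999999 ∧
    (∀ k, (xs.foldl
      (fun (st : PySem.Dict Int (List (List String)) × Int) msg =>
        let int_id := pvHexId msg
        if st.1.contains int_id then
          (st.1.modify int_id [] (fun l => l ++ [msg]), st.2)
        else
          (st.1.insert int_id [msg], if int_id < st.2 then int_id else st.2))
      (PySem.Dict.empty, (999999 : Int))).1.contains k = decide (k ∈ xs.map pvHexId)) ∧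
    (∀ k, (xs.foldl
      (fun (st : PySem.Dict Int (List (List String)) × Int) msg =>
        let int_id := pvHexId msg
        if st.1.contains int_id then
          (st.1.modify int_id [] (fun l => l ++ [msg]), st.2)
        else
          (st.1.insert int_id [msg], if int_id < st.2 then int_id else st.2))
      (PySem.Dict.empty, (999999 : Int))).1.getD k [] = xs.filter (fun m => pvHexId m == k)) := by
  induction xs using List.reverseRecOn with
  | nil =>
    refine ⟨rfl, ?_, ?_⟩ <;> intro k <;>
      simp [PySem.Dict.contains_empty, PySem.Dict.getD_empty]
  | append_singleton xs x ih =>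
    obtain ⟨ih2, ihc, ihg⟩ := ih
    simp only [List.foldl_append, List.foldl_cons, List.foldl_nil, List.map_append,
      List.map_cons, List.map_nil, List.filter_append, List.filter_cons, List.filter_nil]
    set st := (xs.foldl
      (fun (st : PySem.Dict Int (List (List String)) × Int) msg =>
        let int_id := pvHexId msg
        if st.1.contains int_id then
          (st.1.modify int_id [] (fun l => l ++ [msg]), st.2)
        else
          (st.1.insert int_id [msg], if int_id < st.2 then int_id else st.2))
      (PySem.Dict.empty, (999999 : Int))) with hst
    by_cases hc : st.1.contains (pvHexId x) = true
    · have hmem : pvHexId x ∈ xs.map pvHexId := by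
        have := ihc (pvHexId x); rw [hc] at this
        exact of_decide_eq_true this.symm
      simp only [hc, if_true]
      refine ⟨?_, ?_, ?_⟩
      · rw [ih2]
        exact (min_eq_left (pv_foldl_min_le_mem _ _ _ hmem)).symm
      · intro k
        rw [PySem.Dict.contains_modify, ihc k]
        by_cases hk : k = pvHexId x
        · subst hk; simp [hmem]
        · simp [hk]
      · intro k
        rw [PySem.Dict.getD_modify, ihg k, ihg (pvHexId x)]
        by_cases hk : k = pvHexId x
        · subst hk; simp
        · have : (pvHexId x == k) = false := by simp [Ne.symm hk]
          simp [hk, this]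
    · have hnmem : pvHexId x ∉ xs.map pvHexId := by
        intro hm; exact hc (by rw [ihc]; exact decide_eq_true hm)
      simp only [Bool.not_eq_true] at hc
      simp only [hc, Bool.false_eq_true, if_false]
      refine ⟨?_, ?_, ?_⟩
      · rw [ih2, min_def]
        split_ifs <;> omega
      · intro k
        rw [PySem.Dict.contains_insert, ihc k]
        by_cases hk : k = pvHexId x
        · subst hk; simp
        · simp [hk]
      · intro k
        rw [PySem.Dict.getD_insert, ihg k]
        have hfe : xs.filter (fun m => pvHexId m == pvHexId x) = [] := by
          have h1 := ihg (pvHexId x)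
          rw [PySem.Dict.getD_of_not_contains st.1 [] hc] at h1
          exact h1.symm
        by_cases hk : k = pvHexId x
        · subst hk; simp [hfe]
        · have : (pvHexId x == k) = false := by simp [Ne.symm hk]
          simp [hk, this]

-- ===== VERDICT (by name: the statement is the Claim_ definition above) =====
theorem findLowestID_spec : Claim_unchanged_findLowestID := by
  intro MsgList _ _ hnd
  obtain ⟨h2, hc, hg⟩ := pv_loopA MsgList
  unfold findLowestID findLowestID_alt
  simp only []
  cases MsgList with
  | nil => rfl
  | cons x t =>
    have hne : ∃ m₀ ∈ x :: t, pvHexId m₀ < 999999 := by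
      by_contra hall
      refine hnd ⟨by simp, ?_⟩
      rw [List.all_eq_true]; intro m hm
      refine decide_eq_true ?_
      by_contra hlt
      exact hall ⟨m, hm, by omega⟩
    obtain ⟨m₀, hm₀, hlt⟩ := hne
    have hids : (x :: t).map pvHexId = pvHexId x :: t.map pvHexId := rfl
    set M := (t.map pvHexId).foldl min (pvHexId x) with hM
    have hmin? : PySem.List.min? ((x :: t).map pvHexId) (fun y => y) = some M := by
      rw [hids, PySem.List.min?_id_cons]
    have hMle : M ≤ pvHexId m₀ := by
      rcases List.mem_cons.mp hm₀ with rfl | hmem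
      · exact pv_foldl_min_le_init _ _
      · exact pv_foldl_min_le_mem _ _ _ (List.mem_map_of_mem hmem)
    have hMlt : M < 999999 := lt_of_le_of_lt hMle hlt
    have hfold : ((x :: t).map pvHexId).foldl min 999999 = M := by
      rw [hids]
      simp only [List.foldl_cons]
      rw [pv_foldl_min_init]
      exact min_eq_right (le_of_lt hMlt)
    rw [h2, hfold, hmin?, if_pos hMlt, hg M]
    exact congrArg some (pv_zip_filter (x :: t) M).symm

theorem findLowestID_changed : Claim_changed_findLowestID := by
  unfold Claim_changed_findLowestID; decide

theorem findLowestID_tight : Claim_exact_findLowestID := by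
  intro MsgList _ _ hd
  obtain ⟨hne, hall⟩ := hd
  obtain ⟨h2, _, _⟩ := pv_loopA MsgList
  unfold findLowestID findLowestID_alt
  simp only []
  have hge : ∀ i ∈ MsgList.map pvHexId, (999999 : Int) ≤ i := by
    intro i hi
    obtain ⟨m, hm, rfl⟩ := List.mem_map.mp hi
    exact of_decide_eq_true ((List.all_eq_true.mp hall) m hm)
  rw [h2, pv_foldl_min_eq_of_le _ _ hge, if_neg (by omega)]
  cases MsgList with
  | nil => exact absurd rfl hne
  | cons x t =>
    rw [show (x :: t).map pvHexId = pvHexId x :: t.map pvHexId from rfl,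
      PySem.List.min?_id_cons]
    simp
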